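-- pv_equiv track=rewrite | github.com/wgong/csinfo | app.py | _push_selected_cols_to_front
-- ===== SOURCE A (Python) =====
-- def _push_selected_cols_to_front(cols, selected_cols=["name","url","note"]):
--     """move selected column to the front,
--     e.g. name, url
--     """
--     new_select_cols = []
--     new_cols = []
--     for c in cols:
--         if c in selected_cols:
--             new_select_cols.append(c)
--         else:
--             new_cols.append(c)
--     if not new_select_cols:
--         return new_cols
--     else:
--         return new_select_cols + new_cols
-- ===== SOURCE B (Python) =====
-- def _push_selected_cols_to_front(cols, selected_cols=["name", "url", "note"]):
--     """move selected column to the front,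
--     e.g. name, url
--     """
--     return sorted(cols, key=lambda c: c not in selected_cols)
-- ===== Notes on version B (the rewrite author's own statement) =====
-- stated objective: idiomatic
-- what changed: The two-accumulator partition loop with a branch on emptiness is replaced by a single stable sort keyed on non-membership (selected columns get key False and come first, each block keeping original order).
import Mathlib
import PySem

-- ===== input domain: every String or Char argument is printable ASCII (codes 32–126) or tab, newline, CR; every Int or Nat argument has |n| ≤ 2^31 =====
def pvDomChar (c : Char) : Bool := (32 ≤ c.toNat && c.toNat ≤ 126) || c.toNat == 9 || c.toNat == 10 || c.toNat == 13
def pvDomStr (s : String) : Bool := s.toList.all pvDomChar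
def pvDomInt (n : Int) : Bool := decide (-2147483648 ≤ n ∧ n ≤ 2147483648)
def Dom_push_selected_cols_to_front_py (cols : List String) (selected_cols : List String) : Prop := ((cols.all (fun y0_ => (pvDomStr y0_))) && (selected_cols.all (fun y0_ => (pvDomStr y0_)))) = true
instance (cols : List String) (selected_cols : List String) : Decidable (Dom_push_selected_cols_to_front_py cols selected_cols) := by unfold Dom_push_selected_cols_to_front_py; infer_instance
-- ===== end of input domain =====

-- B replaces A's two-accumulator partition loop by one stable sort keyed on non-membership (idiomatic); same return value.

-- ===== PORT A =====
def push_selected_cols_to_front_py (cols : List String) (selected_cols : List String) : List String :=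
  -- new_select_cols / new_cols accumulators, appended in loop order
  let st := cols.foldl
    (fun (acc : List String × List String) c =>
      if selected_cols.contains c then (acc.1 ++ [c], acc.2) else (acc.1, acc.2 ++ [c]))
    ([], [])
  if st.1 = [] then st.2 else st.1 ++ st.2

-- ===== PORT B =====
def push_selected_cols_to_front_py_alt (cols : List String) (selected_cols : List String) : List String :=
  PySem.List.sorted cols (fun c => !(selected_cols.contains c)) false

-- ===== PRECONDITION & SPEC =====
def Spec_push_selected_cols_to_front_py (cols : List String) (selected_cols : List String) (out : List String) : Prop := out = push_selected_cols_to_front_py_alt cols selected_cols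
instance (cols : List String) (selected_cols : List String) (out : List String) : Decidable (Spec_push_selected_cols_to_front_py cols selected_cols out) := by unfold Spec_push_selected_cols_to_front_py; infer_instance

-- ===== CLAIM =====
def Claim_equal_push_selected_cols_to_front_py : Prop := ∀ (cols : List String) (selected_cols : List String), Dom_push_selected_cols_to_front_py cols selected_cols → Spec_push_selected_cols_to_front_py cols selected_cols (push_selected_cols_to_front_py cols selected_cols)

-- ===== LEMMAS AND PROOFS =====

-- insertBy skips a block of elements x is never placed before
theorem pv_insertBy_skip {α : Type} (before : α → α → Bool) (x : α) (L M : List α)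
    (h : ∀ y ∈ L, before x y = false) :
    PySem.List.insertBy before x (L ++ M) = L ++ PySem.List.insertBy before x M := by
  induction L with
  | nil => simp
  | cons y ys ih =>
    simp only [List.cons_append, PySem.List.insertBy, h y (by simp)]
    simp [ih (fun z hz => h z (by simp [hz]))]

-- A's accumulator pair computes the two filters
theorem pv_foldl_partition (sel : List String) (cols : List String) (S N : List String) :
    cols.foldl
      (fun (acc : List String × List String) c =>
        if sel.contains c then (acc.1 ++ [c], acc.2) else (acc.1, acc.2 ++ [c]))
      (S, N)
    = (S ++ cols.filter (fun c => sel.contains c),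
       N ++ cols.filter (fun c => !(sel.contains c))) := by
  induction cols generalizing S N with
  | nil => simp
  | cons c cs ih =>
    simp only [List.foldl_cons]
    by_cases h : sel.contains c = true
    · rw [if_pos h, ih, List.filter_cons, List.filter_cons]
      have hm : c ∈ sel := by simpa using h
      simp [hm]
    · rw [if_neg h, ih, List.filter_cons, List.filter_cons]
      rw [Bool.not_eq_true] at h
      have hm : c ∉ sel := by simpa using h
      simp [hm]

-- Stable sort by the Boolean key is: false-key block (in order) then true-key block (in order)
theorem pv_sorted_bool_partition (k : String → Bool) (cols F T : List String)
    (hF : ∀ y ∈ F, k y = false) (hT : ∀ y ∈ T, k y = true) :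
    cols.foldl
      (fun acc x => PySem.List.insertBy (fun a b => decide (k a < k b)) x acc) (F ++ T)
    = (F ++ cols.filter (fun c => k c = false)) ++ (T ++ cols.filter (fun c => k c = true)) := by
  induction cols generalizing F T with
  | nil => simp
  | cons x xs ih =>
    simp only [List.foldl_cons]
    by_cases hx : k x = true
    · have hstep : PySem.List.insertBy (fun a b => decide (k a < k b)) x (F ++ T)
          = F ++ (T ++ [x]) := by
        rw [PySem.List.insertBy_of_forall_not_before, List.append_assoc]
        intro y hy
        rcases List.mem_append.mp hy with h | h
        · simp [hF y h, hx]
        · simp [hT y h, hx]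
      have hT' : ∀ y ∈ T ++ [x], k y = true := by
        intro y hy
        rcases List.mem_append.mp hy with h | h
        · exact hT y h
        · simp_all
      rw [hstep, ih F (T ++ [x]) hF hT']
      simp [hx]
    · simp only [Bool.not_eq_true] at hx
      have hstep : PySem.List.insertBy (fun a b => decide (k a < k b)) x (F ++ T)
          = (F ++ [x]) ++ T := by
        rw [pv_insertBy_skip _ _ F T (fun y hy => by simp [hF y hy, hx])]
        cases T with
        | nil => simp [PySem.List.insertBy]
        | cons t ts =>
          have ht := hT t (by simp)
          simp [PySem.List.insertBy, ht, hx, Bool.lt_iff]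
      have hF' : ∀ y ∈ F ++ [x], k y = false := by
        intro y hy
        rcases List.mem_append.mp hy with h | h
        · exact hF y h
        · simp_all
      rw [hstep, ih (F ++ [x]) T hF' hT]
      simp [hx]

-- ===== VERDICT =====
theorem push_selected_cols_to_front_py_spec : Claim_equal_push_selected_cols_to_front_py := by
  intro cols sel _
  unfold Spec_push_selected_cols_to_front_py push_selected_cols_to_front_py push_selected_cols_to_front_py_alt
  rw [PySem.List.sorted_eq_foldl_insertBy]
  have hB := pv_sorted_bool_partition (fun c => !(sel.contains c)) cols [] []
    (by simp) (by simp)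
  simp only [List.nil_append] at hB
  rw [hB]
  rw [pv_foldl_partition sel cols [] []]
  simp only [List.nil_append]
  have hfilt : cols.filter (fun c => (!(sel.contains c)) = false)
      = cols.filter (fun c => sel.contains c) := by
    apply List.filter_congr; intro c _; simp
  have hfilt2 : cols.filter (fun c => (!(sel.contains c)) = true)
      = cols.filter (fun c => !(sel.contains c)) := by
    apply List.filter_congr; intro c _; simp
  rw [hfilt, hfilt2]
  by_cases h : cols.filter (fun c => sel.contains c) = []
  · rw [if_pos h, h, List.nil_append]
  · rw [if_neg h]
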